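-- pv_equiv track=rewrite | github.com/Michael-JB/advent-of-code | 2020/day-8/day-8.py | get_uncorrupted_candidates
-- ===== SOURCE A (Python) =====
-- def get_uncorrupted_candidates(program):
--   alternatives = []
--   for line_number, (opcode, operand) in enumerate(program):
--     if opcode != 'acc':
--       alternatives.append([instruction if index != line_number else
--                           ('jmp' if opcode == 'nop' else 'nop', operand)
--                           for index, instruction in enumerate(program)])
--   return alternatives
-- ===== SOURCE B (Python) =====
-- def get_uncorrupted_candidates(program):
--   # Structural recursion on the program: the candidates of (head :: rest) are
--   # the head-flipped program (if head is not 'acc') followed by every candidate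
--   # of rest with head prepended. No indices, no slicing.
--   if not program:
--     return []
--   head = program[0]
--   opcode, operand = head
--   rest = program[1:]
--   here = [[('jmp' if opcode == 'nop' else 'nop', operand)] + rest] if opcode != 'acc' else []
--   return here + [[head] + alt for alt in get_uncorrupted_candidates(rest)]
-- ===== Notes on version B (the rewrite author's own statement) =====
-- stated objective: alternative
-- what changed: B replaces A's indexed outer loop with an inner per-index conditional comprehension by a structural recursion on the list: the candidates of head::rest are the head-flipped program plus head prepended to each candidate of rest, with no indices, enumerate or slicing anywhere.
import Mathlib
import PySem

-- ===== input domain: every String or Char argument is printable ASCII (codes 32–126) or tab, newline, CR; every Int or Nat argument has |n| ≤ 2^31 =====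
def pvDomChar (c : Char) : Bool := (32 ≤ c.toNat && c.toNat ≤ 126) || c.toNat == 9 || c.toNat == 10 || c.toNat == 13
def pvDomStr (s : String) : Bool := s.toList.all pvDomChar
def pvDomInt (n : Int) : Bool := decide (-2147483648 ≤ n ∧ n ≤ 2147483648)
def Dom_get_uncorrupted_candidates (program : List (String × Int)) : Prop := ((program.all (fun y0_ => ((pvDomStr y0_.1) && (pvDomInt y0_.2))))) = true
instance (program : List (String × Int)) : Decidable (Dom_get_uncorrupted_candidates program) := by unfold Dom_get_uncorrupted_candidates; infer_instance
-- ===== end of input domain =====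

-- B re-derives the candidates by structural recursion on the list (flip the head, prepend
-- the head to each candidate of the tail) instead of A's indexed loop with an inner
-- per-index conditional comprehension; objective: alternative decomposition, same cost.


-- ===== PORT A =====
def get_uncorrupted_candidates (program : List (String × Int)) : List (List (String × Int)) :=
  (PySem.List.enumerate program).foldl
    (fun alternatives p =>
      -- p = (line_number, (opcode, operand))
      if p.2.1 != "acc" then
        alternatives ++
          [(PySem.List.enumerate program).map (fun q =>
            if q.1 ≠ p.1 then q.2
            else ((if p.2.1 == "nop" then "jmp" else "nop"), p.2.2))]
      else alternatives) []

-- ===== PORT B =====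
def get_uncorrupted_candidates_alt (program : List (String × Int)) : List (List (String × Int)) :=
  match program with
  | [] => []
  | head :: rest =>
    (if head.1 != "acc" then
      [((if head.1 == "nop" then "jmp" else "nop"), head.2) :: rest]
    else []) ++
    (get_uncorrupted_candidates_alt rest).map (fun alt => head :: alt)

-- ===== PRECONDITION & SPEC =====
def Spec_get_uncorrupted_candidates (program : List (String × Int)) (out : List (List (String × Int))) : Prop := out = get_uncorrupted_candidates_alt program
instance (program : List (String × Int)) (out : List (List (String × Int))) : Decidable (Spec_get_uncorrupted_candidates program out) := by unfold Spec_get_uncorrupted_candidates; infer_instance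

-- ===== CLAIM (what is proved, stated in full; the proofs are below) =====
def Claim_equal_get_uncorrupted_candidates : Prop := ∀ (program : List (String × Int)), Dom_get_uncorrupted_candidates program → Spec_get_uncorrupted_candidates program (get_uncorrupted_candidates program)

-- ===== LEMMAS AND PROOFS =====

-- proof-only helper: the candidate A builds for position p, as a take/patch/drop
def pvPatchCand (program : List (String × Int)) (p : Int × String × Int) : Option (List (String × Int)) :=
  if p.2.1 != "acc" then
    some (program.take p.1.toNat ++
          [((if p.2.1 == "nop" then "jmp" else "nop"), p.2.2)] ++
          program.drop (p.1.toNat + 1))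
  else none

-- mapping snd over an enumeration whose indices all exceed m, with an 'if ≠ m' guard, is the identity
theorem map_if_ne_enumerate_of_lt {α : Type} (xs : List α) (s : Int) (m : Int) (x : α)
    (h : m < s) :
    (PySem.List.enumerate xs s).map (fun q => if q.1 ≠ m then q.2 else x) = xs := by
  induction xs generalizing s with
  | nil => simp [PySem.List.enumerate_nil]
  | cons a t ih =>
    rw [PySem.List.enumerate_cons]
    simp only [List.map_cons]
    rw [if_pos (by omega), ih (s + 1) (by omega)]

-- A's inner conditional comprehension equals a take/patch/drop build, for an in-range index
theorem map_if_eq_patch {α : Type} (xs : List α) (s : Int) (k : Nat) (x : α)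
    (hk : k < xs.length) :
    (PySem.List.enumerate xs s).map (fun q => if q.1 ≠ s + (k : Int) then q.2 else x)
      = xs.take k ++ [x] ++ xs.drop (k + 1) := by
  induction xs generalizing s k with
  | nil => simp at hk
  | cons a t ih =>
    rw [PySem.List.enumerate_cons]
    simp only [List.map_cons]
    cases k with
    | zero =>
      simp only [Nat.cast_zero, add_zero]
      rw [if_neg (by simp)]
      simp only [List.take_zero, List.drop_succ_cons, List.drop_zero, List.nil_append,
        List.cons_append, List.nil_append]
      rw [map_if_ne_enumerate_of_lt t (s + 1) s x (by omega)]
    | succ k' =>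
      rw [if_pos (by omega)]
      have : s + ((k' + 1 : Nat) : Int) = (s + 1) + (k' : Int) := by push_cast; ring
      rw [this, ih (s + 1) k' (by simpa using hk)]
      simp

-- A equals the filterMap-of-patches form
theorem a_eq_filterMap (program : List (String × Int)) :
    get_uncorrupted_candidates program
      = (PySem.List.enumerate program).filterMap (pvPatchCand program) := by
  unfold get_uncorrupted_candidates
  rw [PySem.List.foldl_append_if
    (p := fun p : Int × String × Int => p.2.1 != "acc")
    (f := fun p : Int × String × Int =>
      (PySem.List.enumerate program).map (fun q =>
        if q.1 ≠ p.1 then q.2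
        else ((if p.2.1 == "nop" then "jmp" else "nop"), p.2.2)))]
  rw [List.nil_append, ← List.filterMap_eq_map, List.filterMap_filter]
  apply List.filterMap_congr
  intro p hp
  by_cases h : (p.2.1 != "acc") = true
  · simp only [h, if_true, Function.comp_apply, pvPatchCand, Option.some.injEq]
    rcases (PySem.List.mem_enumerate_iff program 0 p).mp hp with ⟨k, hk, rfl⟩
    simp only [zero_add]
    rw [show ((k : Nat) : Int) = (0 : Int) + (k : Int) by ring]
    rw [map_if_eq_patch program 0 k _ hk]
    simp
  · simp only [h, pvPatchCand]
    rfl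

-- shifting the start of an enumeration shifts every index
theorem enumerate_shift {α : Type} (xs : List α) (s : Int) :
    PySem.List.enumerate xs (s + 1) = (PySem.List.enumerate xs s).map (fun q => (q.1 + 1, q.2)) := by
  induction xs generalizing s with
  | nil => simp [PySem.List.enumerate_nil]
  | cons a t ih => rw [PySem.List.enumerate_cons, PySem.List.enumerate_cons, List.map_cons, ih]

-- the filterMap-of-patches form equals B's structural recursion
theorem filterMap_eq_alt (program : List (String × Int)) :
    (PySem.List.enumerate program).filterMap (pvPatchCand program)
      = get_uncorrupted_candidates_alt program := by
  induction program with
  | nil => simp [PySem.List.enumerate_nil, get_uncorrupted_candidates_alt]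
  | cons x t ih =>
    rw [PySem.List.enumerate_cons, List.filterMap_cons]
    have htail : (PySem.List.enumerate t (0 + 1)).filterMap (pvPatchCand (x :: t))
        = (get_uncorrupted_candidates_alt t).map (fun alt => x :: alt) := by
      rw [enumerate_shift, List.filterMap_map, ← ih, List.map_filterMap]
      apply List.filterMap_congr
      intro q hq
      rcases (PySem.List.mem_enumerate_iff t 0 q).mp hq with ⟨k, hk, rfl⟩
      simp only [Function.comp_apply, pvPatchCand, zero_add]
      by_cases h : (t[k].1 != "acc") = true
      · have h1 : ((k : Int) + 1).toNat = k + 1 := by omega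
        have h2 : ((k : Int)).toNat = k := by omega
        simp [h, h1, h2]
      · simp [h]
    rw [htail]
    conv_rhs => rw [get_uncorrupted_candidates_alt]
    by_cases h : (x.1 != "acc") = true
    · simp only [pvPatchCand, h, if_true]
      simp_all
    · simp only [pvPatchCand, h]
      simp_all

-- ===== VERDICT (by name: the statement is the Claim_ definition above) =====
theorem get_uncorrupted_candidates_spec : Claim_equal_get_uncorrupted_candidates := by
  intro program _
  unfold Spec_get_uncorrupted_candidates
  rw [a_eq_filterMap, filterMap_eq_alt]
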